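-- pv_equiv track=rewrite | github.com/instabase/blueprint-oss | blueprint/py/bp/string_algos.py | substring_edit_distance
-- ===== SOURCE A (Python) =====
-- def substring_edit_distance(s: str, t: str) -> int:
--   """The minimum number of edits required to make t a substring of s.
--
--   An edit is the addition, deletion, or replacement of a character.
--   """
--
--   if not s:
--     return len(t)
--   if not t:
--     return 0
--
--   M = [[0 for _ in range(len(t) + 1)] for _ in range(len(s) + 1)]
--   # M[i][j] is the minimum number of t-edits required to make t[:j] a suffix of s[:i].
--   for i in range(len(s) + 1):
--     M[i][0] = 0
--   for j in range(len(t) + 1):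
--     M[0][j] = j
--
--   for i in range(1, len(s) + 1):
--     for j in range(1, len(t) + 1):
--       cost = 0 if s[i - 1] == t[j - 1] else 1
--       M[i][j] = min(
--           [
--               1 + M[i - 1][j],
--               1 + M[i][j - 1],
--               cost + M[i - 1][j - 1],
--           ])
--
--   return min(M[i][len(t)] for i in range(len(s) + 1))
-- ===== SOURCE B (Python) =====
-- def substring_edit_distance(s: str, t: str) -> int:
--   """The minimum number of edits required to make t a substring of s.
--
--   Top-down memoized recursion: f(i, j) is the minimum number of t-edits
--   required to make t[:j] a suffix of s[:i]; the answer is the minimum of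
--   f(i, len(t)) over all prefixes s[:i].
--   """
--   if not s:
--     return len(t)
--   if not t:
--     return 0
--
--   memo = {}
--
--   def f(i, j):
--     if j == 0:
--       return 0
--     if i == 0:
--       return j
--     key = (i, j)
--     if key in memo:
--       return memo[key]
--     cost = 0 if s[i - 1] == t[j - 1] else 1
--     v = min(1 + f(i - 1, j), 1 + f(i, j - 1), cost + f(i - 1, j - 1))
--     memo[key] = v
--     return v
--
--   return min(f(i, len(t)) for i in range(len(s) + 1))
-- ===== Notes on version B (the rewrite author's own statement) =====
-- stated objective: alternative
-- what changed: B replaces A's bottom-up table fill (two border-initialization loops plus nested i/j loops over a full 2D list) with a top-down memoized recursion f(i,j) over a dict, driven by a min over f(i,len(t)); only the cells actually reachable from the queried corners are computed, and no table is ever allocated.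
import Mathlib
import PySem

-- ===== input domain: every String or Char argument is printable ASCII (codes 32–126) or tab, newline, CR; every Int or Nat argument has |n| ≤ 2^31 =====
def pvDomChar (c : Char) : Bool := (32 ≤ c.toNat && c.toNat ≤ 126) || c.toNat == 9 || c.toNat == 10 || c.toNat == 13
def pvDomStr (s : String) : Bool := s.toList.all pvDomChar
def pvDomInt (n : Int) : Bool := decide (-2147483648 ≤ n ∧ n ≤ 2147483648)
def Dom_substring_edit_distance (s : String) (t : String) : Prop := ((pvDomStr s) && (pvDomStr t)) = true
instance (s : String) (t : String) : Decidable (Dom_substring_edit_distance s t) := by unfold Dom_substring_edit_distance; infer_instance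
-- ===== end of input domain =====

-- B replaces A's bottom-up table fill with a top-down memoized recursion f(i,j) over a dict
-- (objective: alternative decomposition; no table is allocated).

-- ===== PORT A =====
-- 2-D read/write helpers for Python's M[i][j] (every use is in range; defaults never read):
def tget (M : List (List Int)) (i j : Int) : Int :=
  PySem.List.pyGetD (PySem.List.pyGetD M i []) j 0

def tset (M : List (List Int)) (i j : Int) (v : Int) : List (List Int) :=
  PySem.List.pySetD M i (PySem.List.pySetD (PySem.List.pyGetD M i []) j v)

-- M = [[0 …] …] after the two border loops (M[i][0] = 0; M[0][j] = j):
def aM0 (n m : Int) : List (List Int) :=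
  (PySem.List.pyRange 0 (n + 1) 1).map
    (fun _ => (PySem.List.pyRange 0 (m + 1) 1).map (fun _ => (0 : Int)))

def aM1 (n m : Int) : List (List Int) :=
  (PySem.List.pyRange 0 (n + 1) 1).foldl (fun M i => tset M i 0 0) (aM0 n m)

def aM2 (n m : Int) : List (List Int) :=
  (PySem.List.pyRange 0 (m + 1) 1).foldl (fun M j => tset M 0 j j) (aM1 n m)

-- the nested i/j fill loops (s[i-1], t[j-1] read via pyGetD; indices are always in range):
def aTable (sc tc : List Char) : List (List Int) :=
  (PySem.List.pyRange 1 (PySem.List.len sc + 1) 1).foldl (fun M i =>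
    (PySem.List.pyRange 1 (PySem.List.len tc + 1) 1).foldl (fun M j =>
      tset M i j ((PySem.List.min?
        [1 + tget M (i - 1) j, 1 + tget M i (j - 1),
          (if PySem.List.pyGetD sc (i - 1) ' ' == PySem.List.pyGetD tc (j - 1) ' ' then (0:Int) else 1)
            + tget M (i - 1) (j - 1)]
        (fun x => x)).getD 0)) M) (aM2 (PySem.List.len sc) (PySem.List.len tc))

def substring_edit_distance (s : String) (t : String) : Int :=
  if s = "" then PySem.Str.len t
  else if t = "" then 0
  else
    let sc := s.toList
    let tc := t.toList
    let M := aTable sc tc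
    (PySem.List.min?
      ((PySem.List.pyRange 0 (PySem.List.len sc + 1) 1).map
        (fun i => tget M i (PySem.List.len tc)))
      (fun x => x)).getD 0

-- ===== PORT B =====
-- Source B's inner f(i, j): memoized recursion threading the memo dict through the three
-- recursive calls in Python's evaluation order (f(i-1,j), f(i,j-1), f(i-1,j-1)).
def bf (sc tc : List Char) : Nat → Nat → PySem.Dict (Int × Int) Int → Int × PySem.Dict (Int × Int) Int
  | _, 0, memo => (0, memo)
  | 0, j + 1, memo => ((j : Int) + 1, memo)
  | i + 1, j + 1, memo =>
    match memo.get? (((i + 1 : Nat) : Int), ((j + 1 : Nat) : Int)) with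
    | some v => (v, memo)
    | none =>
      let cost : Int := if sc.getD i ' ' == tc.getD j ' ' then 0 else 1
      let r1 := bf sc tc i (j + 1) memo
      let r2 := bf sc tc (i + 1) j r1.2
      let r3 := bf sc tc i j r2.2
      let v := min (min (1 + r1.1) (1 + r2.1)) (cost + r3.1)
      (v, r3.2.insert (((i + 1 : Nat) : Int), ((j + 1 : Nat) : Int)) v)
termination_by i j => (i, j)

def substring_edit_distance_alt (s : String) (t : String) : Int :=
  if s = "" then PySem.Str.len t
  else if t = "" then 0
  else
    let sc := s.toList
    let tc := t.toList
    -- min(f(i, len(t)) for i in range(len(s) + 1)), the memo dict threaded through the generator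
    let r := (List.range (sc.length + 1)).foldl
      (fun (p : Option Int × PySem.Dict (Int × Int) Int) i =>
        let q := bf sc tc i tc.length p.2
        (some (match p.1 with | none => q.1 | some b => min b q.1), q.2))
      (none, PySem.Dict.empty)
    r.1.getD 0

-- ===== PRECONDITION & SPEC =====
def Spec_substring_edit_distance (s : String) (t : String) (out : Int) : Prop := out = substring_edit_distance_alt s t
instance (s : String) (t : String) (out : Int) : Decidable (Spec_substring_edit_distance s t out) := by unfold Spec_substring_edit_distance; infer_instance

-- ===== CLAIM (what is proved, stated in full; the proofs are below) =====
def Claim_equal_substring_edit_distance : Prop := ∀ (s : String) (t : String), Dom_substring_edit_distance s t → Spec_substring_edit_distance s t (substring_edit_distance s t)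

-- ===== LEMMAS AND PROOFS =====

-- the shared recurrence: Etab sc tc i j = min t-edits making tc[:j] a suffix of sc[:i]
def Etab (sc tc : List Char) : Nat → Nat → Int
  | _, 0 => 0
  | 0, j + 1 => (j : Int) + 1
  | i + 1, j + 1 =>
    min (min (1 + Etab sc tc i (j + 1)) (1 + Etab sc tc (i + 1) j))
      ((if sc.getD i ' ' == tc.getD j ' ' then (0 : Int) else 1) + Etab sc tc i j)
termination_by i j => (i, j)

theorem Etab_zero_left (sc tc : List Char) (j : Nat) : Etab sc tc 0 j = (j : Int) := by
  cases j <;> simp [Etab]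

theorem Etab_zero_right (sc tc : List Char) (i : Nat) : Etab sc tc i 0 = 0 := by
  cases i <;> simp [Etab]

-- the common answer both programs compute: min over i of Etab i (len tc)
def ansList (sc tc : List Char) : List Int :=
  (List.range (sc.length + 1)).map (fun i => Etab sc tc i tc.length)

def tg (M : List (List Int)) (i j : Nat) : Int := (M.getD i []).getD j 0

theorem tget_natCast (M : List (List Int)) (i j : Nat) : tget M (i:Int) (j:Int) = tg M i j := by
  simp [tget, tg]

theorem tset_natCast (M : List (List Int)) (i j : Nat) (v : Int) :
    tset M (i:Int) (j:Int) v = M.set i ((M.getD i []).set j v) := by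
  simp [tset]

def shapeM (n m : Nat) (M : List (List Int)) : Prop :=
  M.length = n + 1 ∧ ∀ i : Nat, i ≤ n → (M.getD i []).length = m + 1

theorem getD_set_row (M : List (List Int)) (i : Nat) (r : List Int) (hi : i < M.length) (i' : Nat) :
    (M.set i r).getD i' [] = if i' = i then r else M.getD i' [] := by
  by_cases h : i' = i
  · subst h; simp [List.getD_eq_getElem?_getD, hi]
  · simp [List.getD_eq_getElem?_getD, h, Ne.symm h]

theorem shapeM_set (n m : Nat) (M : List (List Int)) (h : shapeM n m M) (i j : Nat)
    (hi : i ≤ n) (v : Int) : shapeM n m (M.set i ((M.getD i []).set j v)) := by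
  obtain ⟨h1, h2⟩ := h
  refine ⟨by simp [h1], ?_⟩
  intro i' hi'
  rw [getD_set_row _ _ _ (by omega) _]
  split_ifs with he
  · rw [List.length_set]; exact h2 i hi
  · exact h2 i' hi'

theorem getD_set_cell (r : List Int) (j : Nat) (v : Int) (hj : j < r.length) (j' : Nat) :
    (r.set j v).getD j' 0 = if j' = j then v else r.getD j' 0 := by
  by_cases h : j' = j
  · subst h; simp [List.getD_eq_getElem?_getD, List.getElem?_set_self hj]
  · simp [List.getD_eq_getElem?_getD, Ne.symm h, h]

theorem tg_set (n m : Nat) (M : List (List Int)) (h : shapeM n m M) (i j : Nat)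
    (hi : i ≤ n) (hj : j ≤ m) (v : Int) (i' j' : Nat) :
    tg (M.set i ((M.getD i []).set j v)) i' j' = if i' = i ∧ j' = j then v else tg M i' j' := by
  obtain ⟨h1, h2⟩ := h
  unfold tg
  rw [getD_set_row _ _ _ (by omega)]
  by_cases he : i' = i
  · subst he
    rw [if_pos rfl, getD_set_cell _ _ _ (by rw [h2 i' hi]; omega)]
    by_cases hje : j' = j
    · simp [hje]
    · simp [hje]
  · simp [he]

theorem foldl_pyRange_inv {α : Type} (f : α → Int → α) (P : Int → α → Prop) :
    ∀ (k : Nat) (a b : Int), a ≤ b → (b - a).toNat = k → ∀ (init : α), P a init →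
    (∀ x acc, a ≤ x → x < b → P x acc → P (x + 1) (f acc x)) →
    P b ((PySem.List.pyRange a b 1).foldl f init) := by
  intro k
  induction k with
  | zero =>
    intro a b hab hk init h0 _
    have hba : b = a := by omega
    subst hba
    rw [PySem.List.pyRange_one_eq_nil (by omega)]
    exact h0
  | succ k ih =>
    intro a b hab hk init h0 hstep
    have hlt : a < b := by omega
    rw [PySem.List.pyRange_one_cons hlt, List.foldl_cons]
    exact ih (a+1) b (by omega) (by omega) (f init a)
      (hstep a init (le_refl a) hlt h0)
      (fun x acc hx1 hx2 hP => hstep x acc (by omega) hx2 hP)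

theorem min3_eq (a b c : Int) :
    (PySem.List.min? [a, b, c] (fun x => x)).getD 0 = min (min a b) c := by
  rw [PySem.List.min?_id_cons]
  simp [List.foldl, min_assoc]

theorem aM0_eq (n m : Nat) :
    aM0 (n : Int) (m : Int) = List.replicate (n+1) (List.replicate (m+1) (0:Int)) := by
  unfold aM0
  rw [PySem.List.pyRange_one, PySem.List.pyRange_one]
  rw [List.map_const', List.map_const']
  simp

theorem shapeM_rep (n m : Nat) : shapeM n m (List.replicate (n+1) (List.replicate (m+1) (0:Int))) := by
  refine ⟨by simp, ?_⟩
  intro i hi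
  rw [List.getD_replicate _ (by omega), List.length_replicate]

theorem tg_rep (n m : Nat) (i j : Nat) (hi : i ≤ n) (hj : j ≤ m) :
    tg (List.replicate (n+1) (List.replicate (m+1) (0:Int))) i j = 0 := by
  unfold tg
  rw [List.getD_replicate _ (by omega), List.getD_replicate _ (by omega)]

theorem aM1_spec (n m : Nat) :
    shapeM n m (aM1 (n:Int) (m:Int)) ∧
      ∀ i j, i ≤ n → j ≤ m → tg (aM1 (n:Int) (m:Int)) i j = 0 := by
  unfold aM1
  rw [aM0_eq]
  refine foldl_pyRange_inv _
    (fun _ M => shapeM n m M ∧ ∀ i j, i ≤ n → j ≤ m → tg M i j = 0)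
    (n+1) 0 ((n:Int)+1) (by omega) (by omega) _
    ⟨shapeM_rep n m, fun i j hi hj => tg_rep n m i j hi hj⟩ ?_
  intro x acc hx1 hx2 ⟨hsh, hz⟩
  have hx : x = ((x.toNat : Nat) : Int) := by omega
  have e : tset acc x 0 0 = acc.set x.toNat ((acc.getD x.toNat []).set 0 0) := by
    rw [hx]; exact tset_natCast acc x.toNat 0 0
  rw [e]
  have hxn : x.toNat ≤ n := by omega
  refine ⟨shapeM_set n m acc hsh _ _ hxn _, ?_⟩
  intro i j hi hj
  rw [tg_set n m acc hsh _ _ hxn (by omega) _ i j]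
  split_ifs with hc
  · rfl
  · exact hz i j hi hj

theorem aM2_spec (n m : Nat) :
    shapeM n m (aM2 (n:Int) (m:Int)) ∧
      ∀ i j, i ≤ n → j ≤ m →
        tg (aM2 (n:Int) (m:Int)) i j = if i = 0 then (j:Int) else 0 := by
  unfold aM2
  obtain ⟨hsh1, hv1⟩ := aM1_spec n m
  have main := foldl_pyRange_inv (fun M j => tset M 0 j j)
    (fun y M => shapeM n m M ∧ ∀ i j, i ≤ n → j ≤ m →
      tg M i j = if i = 0 ∧ (j:Int) < y then (j:Int) else 0)
    (m+1) 0 ((m:Int)+1) (by omega) (by omega) (aM1 (n:Int) (m:Int))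
    ⟨hsh1, by
      intro i j hi hj
      rw [hv1 i j hi hj]
      have : ¬((j:Int) < 0) := by omega
      simp [this]⟩ ?_
  · refine ⟨main.1, ?_⟩
    intro i j hi hj
    rw [main.2 i j hi hj]
    split_ifs <;> omega
  · intro y acc hy1 hy2 ⟨hsh, hv⟩
    have hy : y = ((y.toNat : Nat) : Int) := by omega
    have e : tset acc 0 y y = acc.set 0 ((acc.getD 0 []).set y.toNat ((y.toNat : Nat) : Int)) := by
      rw [hy]; exact tset_natCast acc 0 y.toNat ((y.toNat : Nat) : Int)
    beta_reduce
    rw [e]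
    have hyn : y.toNat ≤ m := by omega
    refine ⟨shapeM_set n m acc hsh _ _ (by omega) _, ?_⟩
    intro i j hi hj
    rw [tg_set n m acc hsh _ _ (by omega) hyn _ i j]
    rw [hv i j hi hj]
    split_ifs <;> omega

theorem aTable_spec (sc tc : List Char) :
    ∀ i j : Nat, i ≤ sc.length → j ≤ tc.length → tg (aTable sc tc) i j = Etab sc tc i j := by
  set n := sc.length with hn
  set m := tc.length with hm
  unfold aTable
  rw [PySem.List.len_eq, PySem.List.len_eq, ← hn, ← hm]
  obtain ⟨hsh2, hv2⟩ := aM2_spec n m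
  have main := foldl_pyRange_inv
    (fun M i =>
      (PySem.List.pyRange 1 ((m:Int) + 1) 1).foldl (fun M j =>
        tset M i j ((PySem.List.min?
          [1 + tget M (i - 1) j, 1 + tget M i (j - 1),
            (if PySem.List.pyGetD sc (i - 1) ' ' == PySem.List.pyGetD tc (j - 1) ' ' then (0:Int) else 1)
              + tget M (i - 1) (j - 1)]
          (fun x => x)).getD 0)) M)
    (fun x M => shapeM n m M ∧ ∀ i j, i ≤ n → j ≤ m →
      tg M i j = if j = 0 then 0 else if i = 0 then (j:Int)
        else if (i:Int) < x then Etab sc tc i j else 0)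
    n 1 ((n:Int)+1) (by omega) (by omega) (aM2 (n:Int) (m:Int))
    ⟨hsh2, by
      intro i j hi hj
      rw [hv2 i j hi hj]
      split_ifs <;> omega⟩ ?_
  · intro i j hi hj
    rw [main.2 i j hi hj]
    split_ifs with h1 h2 h3
    · rw [h1, Etab_zero_right]
    · rw [h2, Etab_zero_left]
    · rfl
    · omega
  · intro x acc hx1 hx2 ⟨hshx, hvx⟩
    beta_reduce
    have inner := foldl_pyRange_inv
      (fun M j =>
        tset M x j ((PySem.List.min?
          [1 + tget M (x - 1) j, 1 + tget M x (j - 1),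
            (if PySem.List.pyGetD sc (x - 1) ' ' == PySem.List.pyGetD tc (j - 1) ' ' then (0:Int) else 1)
              + tget M (x - 1) (j - 1)]
          (fun x => x)).getD 0))
      (fun y M => shapeM n m M ∧ ∀ i j, i ≤ n → j ≤ m →
        tg M i j = if j = 0 then 0 else if i = 0 then (j:Int)
          else if (i:Int) < x then Etab sc tc i j
          else if (i:Int) = x ∧ (j:Int) < y then Etab sc tc i j else 0)
      m 1 ((m:Int)+1) (by omega) (by omega) acc
      ⟨hshx, by
        intro i j hi hj
        rw [hvx i j hi hj]
        split_ifs <;> first | rfl | omega⟩ ?_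
    · refine ⟨inner.1, ?_⟩
      intro i j hi hj
      rw [inner.2 i j hi hj]
      split_ifs <;> first | rfl | omega
    · -- the cell update at column y of row x
      intro y acc' hy1 hy2 ⟨hsh', hv'⟩
      beta_reduce
      obtain ⟨a, ha⟩ : ∃ a, x.toNat = a + 1 := ⟨x.toNat - 1, by omega⟩
      obtain ⟨b, hb⟩ : ∃ b, y.toNat = b + 1 := ⟨y.toNat - 1, by omega⟩
      have hxe : x = (((a+1 : Nat)) : Int) := by omega
      have hye : y = (((b+1 : Nat)) : Int) := by omega
      have han : a + 1 ≤ n := by omega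
      have hbm : b + 1 ≤ m := by omega
      rw [hxe, hye]
      have ea : (((a+1 : Nat) : Int)) - 1 = ((a : Nat) : Int) := by push_cast; ring
      have eb : (((b+1 : Nat) : Int)) - 1 = ((b : Nat) : Int) := by push_cast; ring
      have hget1 : tget acc' (((a+1 : Nat) : Int) - 1) ((b+1 : Nat) : Int) = Etab sc tc a (b+1) := by
        rw [ea, tget_natCast, hv' a (b+1) (by omega) (by omega)]
        rcases Nat.eq_zero_or_pos a with h0 | h0
        · subst h0; simp [Etab_zero_left]
        · rw [if_neg (by omega), if_neg (by omega), if_pos (by rw [hxe]; push_cast; omega)]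
      have hget2 : tget acc' ((a+1 : Nat) : Int) (((b+1 : Nat) : Int) - 1) = Etab sc tc (a+1) b := by
        rw [eb, tget_natCast, hv' (a+1) b (by omega) (by omega)]
        rcases Nat.eq_zero_or_pos b with h0 | h0
        · subst h0; simp [Etab_zero_right]
        · rw [if_neg (by omega), if_neg (by omega), if_neg (by rw [hxe]; push_cast; omega),
            if_pos (by rw [hxe, hye]; push_cast; exact ⟨rfl, by omega⟩)]
      have hget3 : tget acc' (((a+1 : Nat) : Int) - 1) (((b+1 : Nat) : Int) - 1) = Etab sc tc a b := by
        rw [ea, eb, tget_natCast, hv' a b (by omega) (by omega)]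
        rcases Nat.eq_zero_or_pos b with h0 | h0
        · subst h0; simp [Etab_zero_right]
        rcases Nat.eq_zero_or_pos a with h1 | h1
        · subst h1; rw [if_neg (by omega), if_pos rfl, Etab_zero_left]
        · rw [if_neg (by omega), if_neg (by omega), if_pos (by rw [hxe]; push_cast; omega)]
      have hcs : PySem.List.pyGetD sc (((a+1 : Nat) : Int) - 1) ' ' = sc.getD a ' ' := by
        rw [ea]; exact PySem.List.pyGetD_natCast sc a ' '
      have hct : PySem.List.pyGetD tc (((b+1 : Nat) : Int) - 1) ' ' = tc.getD b ' ' := by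
        rw [eb]; exact PySem.List.pyGetD_natCast tc b ' '
      rw [hget1, hget2, hget3, hcs, hct, min3_eq]
      rw [show min (min (1 + Etab sc tc a (b+1)) (1 + Etab sc tc (a+1) b))
          ((if (sc.getD a ' ' == tc.getD b ' ') = true then (0:Int) else 1) + Etab sc tc a b)
          = Etab sc tc (a+1) (b+1) from by rw [Etab]]
      rw [tset_natCast acc' (a+1) (b+1) (Etab sc tc (a+1) (b+1))]
      refine ⟨shapeM_set n m acc' hsh' _ _ han _, ?_⟩
      intro i j hi hj
      rw [tg_set n m acc' hsh' _ _ han hbm _ i j]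
      by_cases hc : i = a + 1 ∧ j = b + 1
      · rw [if_pos hc, hc.1, hc.2]
        rw [if_neg (by omega), if_neg (by omega), if_neg (by push_cast; omega),
          if_pos (by push_cast; exact ⟨rfl, by omega⟩)]
      · rw [if_neg hc, hv' i j hi hj]
        split_ifs <;> first | rfl | (push_cast at *; omega)

theorem foldl_min_replicate (q : Nat) : (List.replicate q (0:Int)).foldl min 0 = 0 := by
  induction q with
  | zero => rfl
  | succ q ih => simp [List.replicate_succ, ih]

theorem A_eq_ans (s t : String) :
    substring_edit_distance s t = (PySem.List.min? (ansList s.toList t.toList) (fun x => x)).getD 0 := by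
  unfold substring_edit_distance
  split_ifs with h1 h2
  · subst h1
    simp [ansList, PySem.Str.len_eq, PySem.List.min?_id_cons, Etab_zero_left]
  · have ht : t.toList = [] := String.toList_eq_nil_iff.mpr h2
    simp only [ansList, ht, List.length_nil]
    have hmap : (List.range (s.toList.length + 1)).map (fun i => Etab s.toList [] i 0)
        = List.replicate (s.toList.length + 1) 0 := by
      simp [Etab_zero_right, List.map_const']
    rw [hmap, List.replicate_succ, PySem.List.min?_id_cons, foldl_min_replicate]
    rfl
  · simp only []
    have hlist : (PySem.List.pyRange 0 (PySem.List.len s.toList + 1) 1).map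
        (fun i => tget (aTable s.toList t.toList) i (PySem.List.len t.toList))
        = ansList s.toList t.toList := by
      rw [PySem.List.len_eq, PySem.List.len_eq, PySem.List.pyRange_one]
      unfold ansList
      rw [List.map_map]
      apply List.map_congr_left
      intro k hk
      rw [List.mem_range] at hk
      have hk' : k ≤ s.toList.length := by omega
      show tget (aTable s.toList t.toList) ((0:Int) + (k:Int)) ((t.toList.length : Nat) : Int)
        = Etab s.toList t.toList k t.toList.length
      rw [show (0:Int) + (k:Int) = ((k:Nat) : Int) from by ring, tget_natCast]
      exact aTable_spec s.toList t.toList k t.toList.length hk' (le_refl _)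
    rw [hlist]

-- ===== B-side lemmas =====

-- every value stored in the memo is the corresponding Etab cell
def goodMemo (sc tc : List Char) (memo : PySem.Dict (Int × Int) Int) : Prop :=
  ∀ (i j : Nat) (v : Int), memo.get? (((i:Nat):Int), ((j:Nat):Int)) = some v → v = Etab sc tc i j

theorem goodMemo_empty (sc tc : List Char) : goodMemo sc tc PySem.Dict.empty := by
  intro i j v h
  rw [PySem.Dict.get?_empty] at h
  exact absurd h (by simp)

theorem bf_spec_aux (sc tc : List Char) :
    ∀ (n i j : Nat), i + j ≤ n → ∀ (memo : PySem.Dict (Int × Int) Int), goodMemo sc tc memo →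
      (bf sc tc i j memo).1 = Etab sc tc i j ∧ goodMemo sc tc (bf sc tc i j memo).2 := by
  intro n
  induction n with
  | zero =>
    intro i j hij memo hg
    have hi : i = 0 := by omega
    have hj : j = 0 := by omega
    subst hi; subst hj
    rw [bf, Etab_zero_right]
    exact ⟨rfl, hg⟩
  | succ n ih =>
    intro i j hij memo hg
    match i, j with
    | i, 0 =>
      rw [bf, Etab_zero_right]
      exact ⟨rfl, hg⟩
    | 0, j + 1 =>
      rw [bf, Etab_zero_left]
      exact ⟨by push_cast; ring, hg⟩
    | i + 1, j + 1 =>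
      rw [bf]
      cases hmv : memo.get? (((i + 1 : Nat) : Int), ((j + 1 : Nat) : Int)) with
      | some w =>
        exact ⟨hg (i + 1) (j + 1) w hmv, hg⟩
      | none =>
        simp only []
        obtain ⟨e1, g1⟩ := ih i (j + 1) (by omega) memo hg
        obtain ⟨e2, g2⟩ := ih (i + 1) j (by omega) _ g1
        obtain ⟨e3, g3⟩ := ih i j (by omega) _ g2
        rw [e1, e2, e3]
        have hv : min (min (1 + Etab sc tc i (j + 1)) (1 + Etab sc tc (i + 1) j))
            ((if sc.getD i ' ' == tc.getD j ' ' then (0 : Int) else 1) + Etab sc tc i j)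
            = Etab sc tc (i + 1) (j + 1) := by rw [Etab]
        rw [hv]
        refine ⟨rfl, ?_⟩
        intro i' j' v' hv'
        rw [PySem.Dict.get?_insert] at hv'
        split_ifs at hv' with heq
        · have hii : i' = i + 1 ∧ j' = j + 1 := by
            have h1 := congrArg Prod.fst heq
            have h2 := congrArg Prod.snd heq
            simp only [] at h1 h2
            exact ⟨by exact_mod_cast h1, by exact_mod_cast h2⟩
          obtain ⟨hv1, hv2⟩ := hii
          subst hv1; subst hv2
          cases hv'
          rw [Etab]
        · exact g3 i' j' v' hv'

theorem bf_spec (sc tc : List Char) (i j : Nat) (memo : PySem.Dict (Int × Int) Int)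
    (hg : goodMemo sc tc memo) :
    (bf sc tc i j memo).1 = Etab sc tc i j ∧ goodMemo sc tc (bf sc tc i j memo).2 :=
  bf_spec_aux sc tc (i + j) i j (le_refl _) memo hg

-- the outer min-fold of B computes foldl min over the Etab column ends
theorem B_fold (sc tc : List Char) :
    ∀ (k : Nat) (memo : PySem.Dict (Int × Int) Int), goodMemo sc tc memo →
      ((List.range (k + 1)).foldl
        (fun (p : Option Int × PySem.Dict (Int × Int) Int) i =>
          let q := bf sc tc i tc.length p.2
          (some (match p.1 with | none => q.1 | some b => min b q.1), q.2)) (none, memo)).1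
      = some (((List.range k).map (fun i => Etab sc tc (i + 1) tc.length)).foldl min
          (Etab sc tc 0 tc.length)) := by
  -- strengthened: fold over range (k+1) starting from (none, memo) yields
  -- (some (min so far), good memo); prove by induction with range_succ
  have main : ∀ (k : Nat) (memo : PySem.Dict (Int × Int) Int), goodMemo sc tc memo →
      (((List.range (k + 1)).foldl
        (fun (p : Option Int × PySem.Dict (Int × Int) Int) i =>
          let q := bf sc tc i tc.length p.2
          (some (match p.1 with | none => q.1 | some b => min b q.1), q.2)) (none, memo)).1
      = some (((List.range k).map (fun i => Etab sc tc (i + 1) tc.length)).foldl min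
          (Etab sc tc 0 tc.length)))
      ∧ goodMemo sc tc (((List.range (k + 1)).foldl
        (fun (p : Option Int × PySem.Dict (Int × Int) Int) i =>
          let q := bf sc tc i tc.length p.2
          (some (match p.1 with | none => q.1 | some b => min b q.1), q.2)) (none, memo)).2) := by
    intro k
    induction k with
    | zero =>
      intro memo hg
      simp only [List.range_succ, List.range_zero, List.nil_append, List.foldl_cons,
        List.foldl_nil, List.map_nil]
      obtain ⟨e0, g0⟩ := bf_spec sc tc 0 tc.length memo hg
      exact ⟨by rw [e0], g0⟩
    | succ k ih =>
      intro memo hg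
      rw [show k + 1 + 1 = (k + 1) + 1 from rfl, List.range_succ (n := k + 1), List.foldl_append]
      obtain ⟨e1, g1⟩ := ih memo hg
      set st := ((List.range (k + 1)).foldl
        (fun (p : Option Int × PySem.Dict (Int × Int) Int) i =>
          let q := bf sc tc i tc.length p.2
          (some (match p.1 with | none => q.1 | some b => min b q.1), q.2)) (none, memo)) with hst
      obtain ⟨e2, g2⟩ := bf_spec sc tc (k + 1) tc.length st.2 g1
      simp only [List.foldl_cons, List.foldl_nil]
      constructor
      · rw [e1]
        simp only []
        rw [e2]
        rw [List.range_succ, List.map_append, List.foldl_append]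
        simp
      · exact g2
  intro k memo hg
  exact (main k memo hg).1

theorem ansList_cons (sc tc : List Char) :
    ansList sc tc = Etab sc tc 0 tc.length
      :: (List.range sc.length).map (fun i => Etab sc tc (i + 1) tc.length) := by
  unfold ansList
  rw [List.range_succ_eq_map, List.map_cons, List.map_map]
  rfl

theorem B_eq_ans (s t : String) :
    substring_edit_distance_alt s t = (PySem.List.min? (ansList s.toList t.toList) (fun x => x)).getD 0 := by
  unfold substring_edit_distance_alt
  split_ifs with h1 h2
  · subst h1
    simp [ansList, PySem.Str.len_eq, PySem.List.min?_id_cons, Etab_zero_left]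
  · have ht : t.toList = [] := String.toList_eq_nil_iff.mpr h2
    simp only [ansList, ht, List.length_nil]
    have hmap : (List.range (s.toList.length + 1)).map (fun i => Etab s.toList [] i 0)
        = List.replicate (s.toList.length + 1) 0 := by
      simp [Etab_zero_right, List.map_const']
    rw [hmap, List.replicate_succ, PySem.List.min?_id_cons, foldl_min_replicate]
    rfl
  · simp only []
    rw [B_fold s.toList t.toList s.toList.length PySem.Dict.empty
      (goodMemo_empty s.toList t.toList)]
    rw [ansList_cons, PySem.List.min?_id_cons]

-- ===== VERDICT (by name: the statement is the Claim_ definition above) =====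
theorem substring_edit_distance_spec : Claim_equal_substring_edit_distance := by
  intro s t _
  unfold Spec_substring_edit_distance
  rw [A_eq_ans, B_eq_ans]
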